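-- pv_equiv track=rewrite | github.com/RoyianChow/RoyianChowdhury_COMP254A2 | RoyianChowdhury_COMP254A2/RoyianChowdhury_COMP254A2_Ex1.py | example5
-- ===== SOURCE A (Python) =====
-- def example5(first, second):
--     n = len(first)
--     count = 0
--
--     for i in range(0, n):
--         total = 0
--
--         for j in range(0, n):
--             for k in range(0, j + 1):
--                 total += first[k]
--
--         if second[i] == total:
--             count += 1
--
--     return count
-- ===== SOURCE B (Python) =====
-- def example5(first, second):
--     n = len(first)
--     # The nested loops of A always add up to the same constant: compute it
--     # once with a running prefix sum, then count matches in one scan.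
--     total = 0
--     run = 0
--     for x in first:
--         run += x
--         total += run
--     count = 0
--     for v in second[:n]:
--         if v == total:
--             count += 1
--     return count
-- ===== Notes on version B (the rewrite author's own statement) =====
-- stated objective: faster
-- what changed: A recomputes the same doubly-nested prefix-sum total for every i (O(n^3)); B computes that constant total once with a running prefix sum and then counts matches in second[:n] in a single scan (O(n)).
import Mathlib
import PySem

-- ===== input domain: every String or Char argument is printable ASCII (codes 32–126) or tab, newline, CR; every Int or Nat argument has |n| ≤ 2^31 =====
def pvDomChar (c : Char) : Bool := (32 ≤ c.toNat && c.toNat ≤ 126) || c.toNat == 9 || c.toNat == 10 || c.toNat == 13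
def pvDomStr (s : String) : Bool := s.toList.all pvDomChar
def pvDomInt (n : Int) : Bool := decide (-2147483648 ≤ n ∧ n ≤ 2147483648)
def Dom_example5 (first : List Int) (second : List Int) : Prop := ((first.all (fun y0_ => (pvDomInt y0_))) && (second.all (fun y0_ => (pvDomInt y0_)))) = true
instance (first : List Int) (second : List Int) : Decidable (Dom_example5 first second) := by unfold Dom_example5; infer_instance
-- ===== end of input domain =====

-- B computes A's constant nested-prefix-sum total once and counts matches in one scan; faster.

-- ===== PORT A =====
def example5 (first : List Int) (second : List Int) : Int :=
  let n : Int := first.length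
  (PySem.List.pyRange 0 n 1).foldl (fun count i =>
    let total : Int :=
      (PySem.List.pyRange 0 n 1).foldl (fun total j =>
        (PySem.List.pyRange 0 (j + 1) 1).foldl (fun t k =>
          t + PySem.List.pyGetD first k 0) total) 0
    if PySem.List.pyGetD second i 0 = total then count + 1 else count) 0

-- ===== PORT B =====
def example5_alt (first : List Int) (second : List Int) : Int :=
  let n : Int := first.length
  -- one pass over first maintaining (total, run)
  let p := first.foldl (fun (tr : Int × Int) x => (tr.1 + (tr.2 + x), tr.2 + x)) (0, 0)
  (PySem.List.slice second none (some n)).foldl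
    (fun (count : Int) v => if v = p.1 then count + 1 else count) 0

-- ===== PRECONDITION & SPEC =====
-- A indexes second[i] for every i < len(first): it raises IndexError iff second is shorter than first.
def Pre_example5 (first : List Int) (second : List Int) : Prop :=
  first.length ≤ second.length
instance (first : List Int) (second : List Int) : Decidable (Pre_example5 first second) := by unfold Pre_example5; infer_instance
def pvWitness_example5 : List Int × List Int := ([1, 2], [3, 4, 5])

def Spec_example5 (first : List Int) (second : List Int) (out : Int) : Prop := out = example5_alt first second
instance (first : List Int) (second : List Int) (out : Int) : Decidable (Spec_example5 first second out) := by unfold Spec_example5; infer_instance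

-- ===== CLAIM (what is proved, stated in full; the proofs are below) =====
def Claim_equal_example5 : Prop := ∀ (first : List Int) (second : List Int), Dom_example5 first second → Pre_example5 first second → Spec_example5 first second (example5 first second)

-- ===== LEMMAS AND PROOFS =====

-- the constant total: Σ_{m=1}^{n} sum(first.take m), in cons-structural form
def tri : List Int → Int
  | [] => 0
  | x :: t => ((t.length : Int) + 1) * x + tri t

lemma mapGet (xs : List Int) (n : Nat) (h : n ≤ xs.length) :
    (PySem.List.pyRange 0 (n : Int) 1).map (fun i => PySem.List.pyGetD xs i 0) = xs.take n := by
  induction n with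
  | zero => simp [PySem.List.pyRange_one_eq_nil]
  | succ m ih =>
    have hm : m < xs.length := by omega
    rw [show ((m + 1 : Nat) : Int) = (m : Int) + 1 by push_cast; ring,
        PySem.List.pyRange_one_succ_right (Int.natCast_nonneg m)]
    rw [List.map_append, ih (by omega)]
    have hg : PySem.List.pyGetD xs ((m : Nat) : Int) 0 = xs[m] := by
      rw [PySem.List.pyGetD_natCast]
      exact List.getD_eq_getElem _ _ hm
    simp only [List.map_cons, List.map_nil, hg]
    rw [List.take_add_one, List.getElem?_eq_getElem hm]
    simp

lemma sum_map_addc (c : Int) (g : Nat → Int) (l : List Nat) :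
    (l.map (fun k => c + g k)).sum = (l.length : Int) * c + (l.map g).sum := by
  induction l with
  | nil => simp
  | cons a l ih => simp [ih]; ring

lemma range_succ_cons (n : Nat) : List.range (n + 1) = 0 :: (List.range n).map (fun k => k + 1) := by
  induction n with
  | zero => rfl
  | succ m ih =>
    conv_rhs => rw [List.range_succ]
    conv_lhs => rw [List.range_succ]
    rw [ih]
    simp [List.map_append]

lemma tri_eq (xs : List Int) :
    ((List.range xs.length).map (fun k => (xs.take (k + 1)).sum)).sum = tri xs := by
  induction xs with
  | nil => simp [tri]
  | cons x t ih =>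
    rw [List.length_cons, range_succ_cons, List.map_cons, List.sum_cons, List.map_map]
    have hmap : List.map ((fun k => ((x :: t).take (k + 1)).sum) ∘ fun k => k + 1) (List.range t.length)
        = List.map (fun k => x + (t.take (k + 1)).sum) (List.range t.length) :=
      List.map_congr_left (fun k _ => by simp [Function.comp, List.take_succ_cons])
    rw [hmap, sum_map_addc x (fun k => (t.take (k + 1)).sum) (List.range t.length), ih]
    simp only [List.take_succ_cons, List.take_zero, List.sum_cons, List.sum_nil, add_zero,
      List.length_range, tri]
    ring

-- A's inner double loop computes tri first (independently of the outer index)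
lemma total_eq (first : List Int) :
    (PySem.List.pyRange 0 (first.length : Int) 1).foldl (fun total j =>
        (PySem.List.pyRange 0 (j + 1) 1).foldl (fun t k =>
          t + PySem.List.pyGetD first k 0) total) 0 = tri first := by
  have hcong : (PySem.List.pyRange 0 (first.length : Int) 1).foldl (fun total j =>
        (PySem.List.pyRange 0 (j + 1) 1).foldl (fun t k =>
          t + PySem.List.pyGetD first k 0) total) 0
      = (PySem.List.pyRange 0 (first.length : Int) 1).foldl (fun total j =>
          total + (first.take (j.toNat + 1)).sum) 0 := by
    apply PySem.List.foldl_congr_mem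
    intro acc j hj
    have hj' := (PySem.List.mem_pyRange_one.mp hj)
    have hj1 : (j + 1) = ((j.toNat + 1 : Nat) : Int) := by omega
    rw [hj1, PySem.List.foldl_add, mapGet first (j.toNat + 1) (by omega)]
  rw [hcong, PySem.List.foldl_add]
  rw [PySem.List.pyRange_one]
  simp only [sub_zero, Int.toNat_natCast, List.map_map]
  rw [← tri_eq first]
  simp only [zero_add]
  congr 1

-- B's pair fold
lemma bfold (xs : List Int) (t r : Int) :
    xs.foldl (fun (tr : Int × Int) x => (tr.1 + (tr.2 + x), tr.2 + x)) (t, r)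
      = (t + tri xs + (xs.length : Int) * r, r + xs.sum) := by
  induction xs generalizing t r with
  | nil => simp [tri]
  | cons x xt ih =>
    simp only [List.foldl_cons, ih, tri, List.sum_cons, List.length_cons, Prod.mk.injEq]
    constructor <;> (push_cast; ring)

-- counting side: A's index loop over range(n) equals B's scan of second[:n]
lemma count_eq (second : List Int) (n : Nat) (h : n ≤ second.length) (T : Int) :
    (PySem.List.pyRange 0 (n : Int) 1).foldl
        (fun count i => if PySem.List.pyGetD second i 0 = T then count + 1 else count) (0 : Int)
      = (second.take n).foldl (fun (count : Int) v => if v = T then count + 1 else count) 0 := by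
  rw [PySem.List.foldl_ite_add_one, PySem.List.foldl_ite_add_one]
  rw [show (PySem.List.pyRange 0 (n : Int) 1).countP
        (fun i => decide (PySem.List.pyGetD second i 0 = T))
      = ((PySem.List.pyRange 0 (n : Int) 1).map
          (fun i => PySem.List.pyGetD second i 0)).countP (fun v => decide (v = T)) from by
    rw [List.countP_map]; rfl]
  rw [mapGet second n h]

-- ===== VERDICT (by name: the statement is the Claim_ definition above) =====
theorem example5_spec : Claim_equal_example5 := by
  intro first second _ hpre
  unfold Spec_example5 example5 example5_alt
  simp only [bfold first 0 0, zero_add, mul_zero, add_zero]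
  rw [PySem.List.slice_to_natCast]
  trans ((PySem.List.pyRange 0 (first.length : Int) 1).foldl
      (fun count i => if PySem.List.pyGetD second i 0 = tri first then count + 1 else count) 0)
  · apply PySem.List.foldl_congr_mem
    intro acc i _
    rw [total_eq]
  · exact count_eq second first.length hpre (tri first)
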